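-- pv_equiv track=rewrite | github.com/python-scim/scim2-tester | scim2_tester/utils.py | _matches_hierarchical_tags
-- ===== SOURCE A (Python) =====
-- def _matches_hierarchical_tags(func_tags: set[str], filter_tags: set[str]) -> bool:
--     """Check if function tags match filter tags using hierarchical logic.
--
--     Supports patterns like:
--     - "crud" matches "crud:read", "crud:create", etc.
--     - "crud:read" matches exactly "crud:read"
--     - "*" matches any function with tags (always executed)
--
--     :param func_tags: Tags on the function
--     :param filter_tags: Tags to filter by
--     :returns: True if there's a match
--     """
--     if "*" in func_tags:
--         return True
--
--     for filter_tag in filter_tags: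
--         for func_tag in func_tags:
--             if filter_tag == func_tag:
--                 return True
--             if ":" in func_tag and filter_tag in func_tag.split(":"):
--                 return True
--
--     return False
-- ===== SOURCE B (Python) =====
-- def _matches_hierarchical_tags(func_tags, filter_tags):
--     if "*" in func_tags:
--         return True
--     expanded = set()
--     for tag in func_tags:
--         expanded.add(tag)
--         if ":" in tag:
--             expanded.update(tag.split(":"))
--     return not expanded.isdisjoint(filter_tags)
-- ===== Notes on version B (the rewrite author's own statement) =====
-- stated objective: simpler
-- what changed: Replaces the nested filter×func scan (with a substring test and a split inside the inner loop) by building an expanded tag set once (each tag plus its colon-separated components) and finishing with a single set-disjointness test.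
import Mathlib
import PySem

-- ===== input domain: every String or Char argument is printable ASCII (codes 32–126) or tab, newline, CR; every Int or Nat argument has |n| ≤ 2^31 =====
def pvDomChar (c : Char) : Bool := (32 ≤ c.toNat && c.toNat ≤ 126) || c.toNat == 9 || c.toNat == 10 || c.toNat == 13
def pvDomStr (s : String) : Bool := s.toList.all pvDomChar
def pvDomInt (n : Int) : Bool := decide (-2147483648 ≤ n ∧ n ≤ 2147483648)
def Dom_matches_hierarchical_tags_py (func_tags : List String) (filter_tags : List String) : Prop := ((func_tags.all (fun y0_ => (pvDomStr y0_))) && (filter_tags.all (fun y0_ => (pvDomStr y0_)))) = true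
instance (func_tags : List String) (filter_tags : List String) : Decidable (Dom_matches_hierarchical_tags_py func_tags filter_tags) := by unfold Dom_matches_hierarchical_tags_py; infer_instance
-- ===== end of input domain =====

-- B builds an expanded tag set once (each tag plus its colon components) and tests
-- set disjointness with the filter tags, instead of A's nested scan: simpler, one pass over func_tags.


-- ===== PORT A =====
def matches_hierarchical_tags_py (func_tags : List String) (filter_tags : List String) : Bool :=
  if func_tags.contains "*" then true
  else
    filter_tags.any (fun filter_tag =>
      func_tags.any (fun func_tag =>
        filter_tag == func_tag
          || (PySem.Str.isIn ":" func_tag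
              && ((PySem.Str.split? func_tag ":").getD []).contains filter_tag)))

-- ===== PORT B =====
def matches_hierarchical_tags_py_alt (func_tags : List String) (filter_tags : List String) : Bool :=
  if func_tags.contains "*" then true
  else
    let expanded := func_tags.foldl (fun s tag =>
      let s := PySem.Set.add s tag
      if PySem.Str.isIn ":" tag then
        ((PySem.Str.split? tag ":").getD []).foldl PySem.Set.add s
      else s) PySem.Set.empty
    !(PySem.Set.isdisjoint expanded filter_tags)

-- ===== PRECONDITION & SPEC =====
def Spec_matches_hierarchical_tags_py (func_tags : List String) (filter_tags : List String) (out : Bool) : Prop := out = matches_hierarchical_tags_py_alt func_tags filter_tags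
instance (func_tags : List String) (filter_tags : List String) (out : Bool) : Decidable (Spec_matches_hierarchical_tags_py func_tags filter_tags out) := by unfold Spec_matches_hierarchical_tags_py; infer_instance

-- ===== CLAIM (what is proved, stated in full; the proofs are below) =====
def Claim_equal_matches_hierarchical_tags_py : Prop := ∀ (func_tags : List String) (filter_tags : List String), Dom_matches_hierarchical_tags_py func_tags filter_tags → Spec_matches_hierarchical_tags_py func_tags filter_tags (matches_hierarchical_tags_py func_tags filter_tags)

-- ===== LEMMAS AND PROOFS =====

-- membership in B's accumulated set after one step of the loop body
theorem mem_step (s : List String) (tag y : String) :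
    y ∈ (if PySem.Str.isIn ":" tag then
            ((PySem.Str.split? tag ":").getD []).foldl PySem.Set.add (PySem.Set.add s tag)
          else PySem.Set.add s tag)
      ↔ y ∈ s ∨ (y = tag ∨ (PySem.Str.isIn ":" tag ∧ y ∈ (PySem.Str.split? tag ":").getD [])) := by
  split_ifs with h
  · have := PySem.Set.mem_foldl_add (f := fun b : String => b)
      (l := (PySem.Str.split? tag ":").getD []) (s := PySem.Set.add s tag) (y := y)
    rw [this, PySem.Set.mem_add]
    constructor
    · rintro ((hs | ht) | ⟨b, hb, rfl⟩)
      · exact Or.inl hs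
      · exact Or.inr (Or.inl ht)
      · exact Or.inr (Or.inr ⟨h, hb⟩)
    · rintro (hs | rfl | ⟨_, hb⟩)
      · exact Or.inl (Or.inl hs)
      · exact Or.inl (Or.inr rfl)
      · exact Or.inr ⟨y, hb, rfl⟩
  · rw [PySem.Set.mem_add]
    constructor
    · rintro (hs | rfl)
      · exact Or.inl hs
      · exact Or.inr (Or.inl rfl)
    · rintro (hs | rfl | ⟨hc, _⟩)
      · exact Or.inl hs
      · exact Or.inr rfl
      · exact absurd hc h

-- characterisation of B's expanded set
theorem mem_expanded (func_tags : List String) (s : List String) (y : String) :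
    y ∈ func_tags.foldl (fun s tag =>
          let s := PySem.Set.add s tag
          if PySem.Str.isIn ":" tag then
            ((PySem.Str.split? tag ":").getD []).foldl PySem.Set.add s
          else s) s
      ↔ y ∈ s ∨ ∃ f ∈ func_tags,
          y = f ∨ (PySem.Str.isIn ":" f ∧ y ∈ (PySem.Str.split? f ":").getD []) := by
  induction func_tags generalizing s with
  | nil => simp
  | cons tag rest ih =>
    simp only [List.foldl_cons, ih, List.mem_cons]
    rw [show (let s' := PySem.Set.add s tag;
          if PySem.Str.isIn ":" tag then
            ((PySem.Str.split? tag ":").getD []).foldl PySem.Set.add s'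
          else s') = (if PySem.Str.isIn ":" tag then
            ((PySem.Str.split? tag ":").getD []).foldl PySem.Set.add (PySem.Set.add s tag)
          else PySem.Set.add s tag) from rfl]
    constructor
    · rintro (h | ⟨f, hf, hy⟩)
      · rcases (mem_step s tag y).mp h with hs | hy
        · exact Or.inl hs
        · exact Or.inr ⟨tag, Or.inl rfl, hy⟩
      · exact Or.inr ⟨f, Or.inr hf, hy⟩
    · rintro (hs | ⟨f, hf, hy⟩)
      · exact Or.inl ((mem_step s tag y).mpr (Or.inl hs))
      · rcases hf with rfl | hf
        · exact Or.inl ((mem_step s _ y).mpr (Or.inr hy))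
        · exact Or.inr ⟨f, hf, hy⟩

-- ===== VERDICT (by name: the statement is the Claim_ definition above) =====
theorem matches_hierarchical_tags_py_spec : Claim_equal_matches_hierarchical_tags_py := by
  intro func_tags filter_tags _
  unfold Spec_matches_hierarchical_tags_py matches_hierarchical_tags_py matches_hierarchical_tags_py_alt
  split_ifs with h
  · rfl
  · rw [Bool.eq_iff_iff]
    simp only [List.any_eq_true, Bool.or_eq_true, Bool.and_eq_true, beq_iff_eq,
      Bool.not_eq_true', Bool.eq_false_iff, Ne, PySem.Set.isdisjoint_iff]
    push_neg
    constructor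
    · rintro ⟨ft, hft, f, hf, hcase⟩
      refine ⟨ft, ?_, hft⟩
      rw [mem_expanded]
      refine Or.inr ⟨f, hf, ?_⟩
      rcases hcase with rfl | ⟨hc, hm⟩
      · exact Or.inl rfl
      · exact Or.inr ⟨hc, by simpa using hm⟩
    · rintro ⟨y, hy, hyf⟩
      rw [mem_expanded] at hy
      rcases hy with h0 | ⟨f, hf, hy⟩
      · simp [PySem.Set.empty] at h0
      · refine ⟨y, hyf, f, hf, ?_⟩
        rcases hy with rfl | ⟨hc, hm⟩
        · exact Or.inl rfl
        · exact Or.inr ⟨hc, by simpa using hm⟩
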